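-- pv_equiv track=rewrite | github.com/sridharstreaks/Streaks-Movies | streamlit/tamilyogi.py | remove_extra_url
-- ===== SOURCE A (Python) =====
-- def remove_extra_url(url):
--     # Find the index of the 3rd slash
--     index = -1
--     for i in range(3):
--         index = url.find("/", index + 1)
--         if index == -1:
--             break
--
--     # Remove everything after the 3rd slash
--     if index != -1:
--         result = url[:index + 1]
--     else:
--         result = url
--
--     return result
-- ===== SOURCE B (Python) =====
-- def remove_extra_url(url):
--     parts = url.split("/", 3)
--     if len(parts) == 4:
--         return "/".join(parts[:3]) + "/"
--     return url
-- ===== Notes on version B (the rewrite author's own statement) =====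
-- stated objective: idiomatic
-- what changed: A locates the third slash by iterating str.find three times with a running index and then slices; B instead splits the string once with maxsplit 3 and, when four parts result, rejoins the first three parts with the separator and appends it.
import Mathlib
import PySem

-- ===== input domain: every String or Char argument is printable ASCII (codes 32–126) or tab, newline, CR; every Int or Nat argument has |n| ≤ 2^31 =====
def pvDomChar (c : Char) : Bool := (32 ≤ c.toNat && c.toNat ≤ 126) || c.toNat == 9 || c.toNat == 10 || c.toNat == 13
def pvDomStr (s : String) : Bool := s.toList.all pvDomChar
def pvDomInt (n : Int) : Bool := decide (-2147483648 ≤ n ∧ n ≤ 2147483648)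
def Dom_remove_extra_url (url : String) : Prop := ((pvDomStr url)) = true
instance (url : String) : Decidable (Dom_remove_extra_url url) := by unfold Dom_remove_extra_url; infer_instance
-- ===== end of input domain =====

-- B replaces A's three-iteration find-loop by a single split("/", 3) plus a join; same return value.
-- ===== PORT A =====
def remove_extra_url (url : String) : String :=
  -- index = -1; for i in range(3): index = url.find("/", index + 1); if index == -1: break
  let st := (PySem.List.pyRange 0 3 1).foldl
    (fun (st : Int × Bool) _i =>
      if st.2 then st
      else
        let j := PySem.Str.findFrom url "/" (st.1 + 1)
        (j, j == -1)) ((-1 : Int), false)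
  -- if index != -1: result = url[:index + 1] else: result = url
  if st.1 ≠ -1 then PySem.Str.slice url none (some (st.1 + 1)) else url

-- ===== PORT B =====
def remove_extra_url_alt (url : String) : String :=
  -- parts = url.split("/", 3)
  let parts := PySem.Chars.splitOnMax url.toList ['/'] 3
  -- if len(parts) == 4: return "/".join(parts[:3]) + "/"
  if parts.length = 4 then String.ofList (PySem.Chars.join ['/'] (parts.take 3) ++ ['/'])
  else url

-- ===== PRECONDITION & SPEC =====
def Spec_remove_extra_url (url : String) (out : String) : Prop := out = remove_extra_url_alt url
instance (url : String) (out : String) : Decidable (Spec_remove_extra_url url out) := by unfold Spec_remove_extra_url; infer_instance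

-- ===== CLAIM (what is proved, stated in full; the proofs are below) =====
def Claim_equal_remove_extra_url : Prop := ∀ (url : String), Dom_remove_extra_url url → Spec_remove_extra_url url (remove_extra_url url)

-- ===== LEMMAS AND PROOFS =====

def occSlash : List Char → Nat → Option Nat
  | [], _ => none
  | c :: t, m =>
    if c = '/' then (if m = 0 then some 0 else (occSlash t (m - 1)).map (· + 1))
    else (occSlash t m).map (· + 1)
def cutSlash : List Char → Nat → Option (List Char)
  | [], _ => none
  | c :: t, m =>
    if c = '/' then (if m = 0 then some [c] else (cutSlash t (m - 1)).map (c :: ·))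
    else (cutSlash t m).map (c :: ·)
def preFirst (p : List Char) : List (List Char) → List (List Char)
  | q :: qs => (p ++ q) :: qs
  | [] => [p]
def splSlash : List Char → Nat → List (List Char)
  | l, 0 => [l]
  | [], _ + 1 => [[]]
  | c :: t, m + 1 => if c = '/' then [] :: splSlash t m else preFirst [c] (splSlash t (m + 1))

lemma cut_occ (cs : List Char) (m : Nat) :
    cutSlash cs m = (occSlash cs m).map (fun i => cs.take (i + 1)) := by
  induction cs generalizing m with
  | nil => simp [cutSlash, occSlash]
  | cons c t ih =>
    simp only [cutSlash, occSlash]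
    by_cases hc : c = '/'
    · rw [if_pos hc, if_pos hc]
      by_cases hm : m = 0
      · simp [hm, hc]
      · rw [if_neg hm, if_neg hm, ih]
        cases occSlash t (m-1) <;> simp
    · rw [if_neg hc, if_neg hc, ih]
      cases occSlash t m <;> simp

lemma spl_ne_nil (l : List Char) (m : Nat) : splSlash l m ≠ [] := by
  induction l generalizing m with
  | nil => cases m <;> simp [splSlash]
  | cons c t ih =>
    cases m with
    | zero => simp [splSlash]
    | succ m =>
      simp only [splSlash]
      by_cases hc : c = '/'
      · simp [hc]
      · rw [if_neg hc]
        cases h : splSlash t (m+1) with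
        | nil => exact absurd h (ih _)
        | cons q qs => simp [preFirst]

lemma preFirst_preFirst (p q : List Char) (parts : List (List Char)) :
    preFirst p (preFirst q parts) = preFirst (p ++ q) parts := by
  cases parts <;> simp [preFirst]

lemma preFirst_nil {parts : List (List Char)} (h : parts ≠ []) : preFirst [] parts = parts := by
  cases parts with
  | nil => exact absurd rfl h
  | cons q qs => simp [preFirst]

lemma go_spl (fuel : Nat) : ∀ (l : List Char) (m : Nat) (cur : List Char) (acc : List (List Char)),
    l.length ≤ fuel →
    PySem.Chars.splitOnMax.go ['/'] fuel m l cur acc =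
      acc.reverse ++ preFirst cur.reverse (splSlash l m) := by
  induction fuel with
  | zero =>
    intro l m cur acc hl
    have : l = [] := by cases l <;> simp at hl ⊢
    subst this
    cases m <;> simp [PySem.Chars.splitOnMax.go, splSlash, preFirst]
  | succ fuel ih =>
    intro l m cur acc hl
    cases l with
    | nil =>
      cases m <;> simp [PySem.Chars.splitOnMax.go, splSlash, preFirst]
    | cons c rest =>
      cases m with
      | zero =>
        simp [PySem.Chars.splitOnMax.go, splSlash, preFirst]
      | succ m =>
        by_cases hc : c = '/'
        · subst hc
          rw [show PySem.Chars.splitOnMax.go ['/'] (fuel+1) (m+1) ('/'::rest) cur acc =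
              PySem.Chars.splitOnMax.go ['/'] fuel (m+1-1) (List.drop 1 ('/'::rest)) [] (cur.reverse :: acc) from by
            simp [PySem.Chars.splitOnMax.go, List.isPrefixOf]]
          rw [ih _ _ _ _ (by simpa using Nat.le_of_succ_le_succ (by simpa using hl))]
          simp only [Nat.add_sub_cancel, List.drop_succ_cons, List.drop_zero,
            List.reverse_cons, List.reverse_nil]
          rw [preFirst_nil (spl_ne_nil _ _)]
          simp [splSlash, preFirst]
        · have hbe : (['/'].isPrefixOf (c :: rest)) = false := by
            simp [List.isPrefixOf]; exact fun h => hc h.symm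
          rw [show PySem.Chars.splitOnMax.go ['/'] (fuel+1) (m+1) (c::rest) cur acc =
              PySem.Chars.splitOnMax.go ['/'] fuel (m+1) rest (c :: cur) acc from by
            simp [PySem.Chars.splitOnMax.go, hbe]]
          rw [ih _ _ _ _ (by simpa using hl)]
          simp only [List.reverse_cons]
          rw [show splSlash (c::rest) (m+1) = preFirst [c] (splSlash rest (m+1)) from by
            simp [splSlash, hc]]
          rw [preFirst_preFirst]

lemma inter_cons (c : Char) (q : List Char) (rest : List (List Char)) :
    List.intercalate ['/'] ((c :: q) :: rest) = c :: List.intercalate ['/'] (q :: rest) := by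
  cases rest <;> simp [List.intercalate, List.intersperse]

lemma inter_cons_cons (x y : List Char) (r : List (List Char)) :
    List.intercalate ['/'] (x :: y :: r) = x ++ ['/'] ++ List.intercalate ['/'] (y :: r) := by
  simp [List.intercalate, List.intersperse]

lemma splG (cs : List Char) (m : Nat) :
    (∀ p, cutSlash cs m = some p →
      (splSlash cs (m + 1)).length = m + 2 ∧
      PySem.Chars.join ['/'] ((splSlash cs (m + 1)).take (m + 1)) ++ ['/'] = p)
    ∧ (cutSlash cs m = none → (splSlash cs (m + 1)).length ≤ m + 1) := by
  induction cs generalizing m with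
  | nil =>
    refine ⟨fun p hp => by simp [cutSlash] at hp, fun _ => ?_⟩
    simp [splSlash]
  | cons c t ih =>
    obtain ⟨q, qs, hq⟩ : ∃ q qs, splSlash t (m + 1) = q :: qs := by
      cases h : splSlash t (m + 1) with
      | nil => exact absurd h (spl_ne_nil _ _)
      | cons q qs => exact ⟨q, qs, rfl⟩
    by_cases hc : c = '/'
    · subst hc
      cases m with
      | zero =>
        refine ⟨fun p hp => ?_, fun hn => by simp [cutSlash] at hn⟩
        simp only [cutSlash, if_pos rfl] at hp
        cases hp
        simp [splSlash, PySem.Chars.join, List.intercalate]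
      | succ m =>
        have hsp : splSlash ('/'::t) (m+1+1) = [] :: splSlash t (m+1) := by
          simp [splSlash]
        have hct : cutSlash ('/'::t) (m+1) = (cutSlash t m).map ('/' :: ·) := by
          simp [cutSlash]
        constructor
        · intro p hp
          rw [hct] at hp
          cases hcut : cutSlash t m with
          | none => simp [hcut] at hp
          | some p' =>
            rw [hcut] at hp; simp at hp; subst hp
            obtain ⟨hlen, hjoin⟩ := (ih m).1 p' hcut
            obtain ⟨q', qs', hq'⟩ : ∃ q' qs', splSlash t (m + 1) = q' :: qs' := by
              cases h : splSlash t (m + 1) with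
              | nil => exact absurd h (spl_ne_nil _ _)
              | cons a b => exact ⟨a, b, rfl⟩
            rw [hsp]
            refine ⟨by simp [hlen], ?_⟩
            rw [hq'] at hjoin ⊢
            rw [List.take_succ_cons] at hjoin ⊢
            rw [List.take_succ_cons]
            simp only [PySem.Chars.join] at hjoin ⊢
            rw [inter_cons_cons]
            simp only [List.nil_append, List.append_assoc]
            rw [hjoin]
            rfl
        · intro hn
          rw [hct] at hn
          cases hcut : cutSlash t m with
          | some p' => simp [hcut] at hn
          | none =>
            have := (ih m).2 hcut
            rw [hsp]
            simpa using this
    · have hsp : splSlash (c::t) (m+1) = (c :: q) :: qs := by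
        cases m with
        | zero => simp [splSlash, hc, hq, preFirst]
        | succ m => simp [splSlash, hc, hq, preFirst]
      have hct : cutSlash (c::t) m = (cutSlash t m).map (c :: ·) := by
        simp [cutSlash, hc]
      constructor
      · intro p hp
        rw [hct] at hp
        cases hcut : cutSlash t m with
        | none => simp [hcut] at hp
        | some p' =>
          rw [hcut] at hp; simp at hp; subst hp
          obtain ⟨hlen, hjoin⟩ := (ih m).1 p' hcut
          rw [hq] at hlen hjoin
          rw [hsp]
          refine ⟨by simpa using hlen, ?_⟩
          rw [List.take_succ_cons] at hjoin ⊢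
          simp only [PySem.Chars.join] at hjoin ⊢
          cases hm : m with
          | zero =>
            subst hm
            simp only [List.take_zero] at hjoin ⊢
            simp only [List.intercalate, List.intersperse] at hjoin ⊢
            simp at hjoin ⊢
            rw [hjoin]
          | succ m' =>
            subst hm
            rw [inter_cons]
            simp only [List.cons_append]
            rw [hjoin]
      · intro hn
        rw [hct] at hn
        cases hcut : cutSlash t m with
        | some p' => simp [hcut] at hn
        | none =>
          have := (ih m).2 hcut
          rw [hq] at this
          rw [hsp]
          simpa using this

lemma find_go_slash (cs : List Char) (k : Nat) :
    PySem.Chars.find.go ['/'] cs k =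
      match occSlash cs 0 with | some i => ((k + i : Nat) : Int) | none => -1 := by
  induction cs generalizing k with
  | nil => simp [PySem.Chars.find.go, occSlash]
  | cons c t ih =>
    by_cases hc : c = '/'
    · subst hc; simp [PySem.Chars.find.go, occSlash, List.isPrefixOf]
    · have hbe : ('/' == c) = false := by
        rw [beq_eq_false_iff_ne]; exact fun h => hc h.symm
      simp only [PySem.Chars.find.go, occSlash, List.isPrefixOf, if_neg hc, hbe,
        Bool.false_and, Bool.false_eq_true, if_false, ih (k+1)]
      cases h : occSlash t 0 <;> simp [h] <;> push_cast <;> ring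

lemma occ_lt {cs : List Char} {m i : Nat} (h : occSlash cs m = some i) : i < cs.length := by
  induction cs generalizing m i with
  | nil => simp [occSlash] at h
  | cons c t ih =>
    simp only [occSlash] at h
    by_cases hc : c = '/'
    · rw [if_pos hc] at h
      by_cases hm : m = 0
      · rw [if_pos hm] at h; cases h; simp
      · rw [if_neg hm] at h
        cases ho : occSlash t (m-1) with
        | none => simp [ho] at h
        | some j => rw [ho] at h; simp at h; subst h; have := ih ho; simp; omega
    · rw [if_neg hc] at h
      cases ho : occSlash t m with
      | none => simp [ho] at h
      | some j => rw [ho] at h; simp at h; subst h; have := ih ho; simp; omega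

lemma occ_none_succ {cs : List Char} {m : Nat} (h : occSlash cs m = none) :
    occSlash cs (m + 1) = none := by
  induction cs generalizing m with
  | nil => simp [occSlash]
  | cons c t ih =>
    simp only [occSlash] at h ⊢
    by_cases hc : c = '/'
    · rw [if_pos hc] at h ⊢
      by_cases hm : m = 0
      · simp [hm] at h
      · rw [if_neg hm] at h
        rw [if_neg (by omega : ¬ m + 1 = 0), Nat.add_sub_cancel]
        cases ho : occSlash t (m-1) with
        | none =>
          have h2 : occSlash t m = none := by
            rw [show m = m - 1 + 1 from by omega]; exact ih ho
          simp [h2]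
        | some j => simp [ho] at h
    · rw [if_neg hc] at h ⊢
      cases ho : occSlash t m with
      | none => simp [ih ho]
      | some j => simp [ho] at h

lemma occ_succ_some {cs : List Char} {m i : Nat} (h : occSlash cs m = some i) :
    occSlash cs (m + 1) = (occSlash (cs.drop (i + 1)) 0).map (fun j => i + 1 + j) := by
  induction cs generalizing m i with
  | nil => simp [occSlash] at h
  | cons c t ih =>
    simp only [occSlash] at h ⊢
    by_cases hc : c = '/'
    · rw [if_pos hc] at h ⊢
      rw [if_neg (by omega : ¬ m + 1 = 0), Nat.add_sub_cancel]
      by_cases hm : m = 0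
      · subst hm
        rw [if_pos rfl] at h
        cases h
        simp only [List.drop_succ_cons, List.drop_zero]
        cases occSlash t 0 <;> simp [Nat.add_comm]
      · rw [if_neg hm] at h
        cases ho : occSlash t (m-1) with
        | none => simp [ho] at h
        | some j =>
          rw [ho] at h; simp at h; subst h
          have ihh := ih ho
          rw [show m - 1 + 1 = m from by omega] at ihh
          rw [ihh]
          simp only [List.drop_succ_cons]
          cases occSlash (t.drop (j+1)) 0 <;> simp <;> omega
    · rw [if_neg hc] at h ⊢
      cases ho : occSlash t m with
      | none => simp [ho] at h
      | some j =>
        rw [ho] at h; simp at h; subst h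
        rw [ih ho]
        simp only [List.drop_succ_cons]
        cases occSlash (t.drop (j+1)) 0 <;> simp <;> omega

lemma find_slash (cs : List Char) :
    PySem.Chars.find cs ['/'] =
      match occSlash cs 0 with | some i => ((i : Nat) : Int) | none => -1 := by
  have := find_go_slash cs 0
  simp only [PySem.Chars.find] at *
  rw [this]
  cases occSlash cs 0 <;> simp


lemma alt_cut (url : String) :
    remove_extra_url_alt url =
      match cutSlash url.toList 2 with
      | some p => String.ofList p
      | none => url := by
  unfold remove_extra_url_alt
  have hsm : PySem.Chars.splitOnMax url.toList ['/'] 3 = splSlash url.toList 3 := by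
    rw [show PySem.Chars.splitOnMax url.toList ['/'] 3 =
        PySem.Chars.splitOnMax.go ['/'] (url.toList.length + 1) 3 url.toList [] [] from by
      simp [PySem.Chars.splitOnMax]]
    rw [go_spl _ _ _ _ _ (by omega)]
    simp only [List.reverse_nil, List.nil_append]
    exact preFirst_nil (spl_ne_nil _ _)
  simp only [hsm, show (3:Nat) = 2 + 1 from rfl]
  cases hcut : cutSlash url.toList 2 with
  | some p =>
    obtain ⟨hlen, hjoin⟩ := (splG url.toList 2).1 p hcut
    rw [if_pos (by omega : (splSlash url.toList (2+1)).length = 2 + 2), hjoin]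
  | none =>
    have := (splG url.toList 2).2 hcut
    rw [if_neg (by omega : ¬ (splSlash url.toList (2+1)).length = 2 + 2)]

lemma findFrom_occ (url : String) {m i : Nat} (h : occSlash url.toList m = some i) :
    PySem.Str.findFrom url "/" ((i : Int) + 1) =
      match occSlash url.toList (m + 1) with
      | some i' => ((i' : Nat) : Int)
      | none => -1 := by
  have hle : i + 1 ≤ url.toList.length := occ_lt h
  rw [PySem.Str.findFrom_eq]
  have hcast : ((i : Int) + 1) = ((i + 1 : Nat) : Int) := by push_cast; ring
  rw [hcast]
  rw [show ("/" : String).toList = ['/'] from rfl]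
  rw [PySem.Chars.findFrom_natCast _ _ _ hle]
  rw [find_slash]
  rw [occ_succ_some h]
  cases occSlash (url.toList.drop (i + 1)) 0 with
  | none => simp
  | some j => simp

lemma a_cut (url : String) :
    remove_extra_url url =
      match cutSlash url.toList 2 with
      | some p => String.ofList p
      | none => url := by
  unfold remove_extra_url
  rw [show PySem.List.pyRange 0 3 1 = [0, 1, 2] from by decide]
  simp only [List.foldl_cons, List.foldl_nil]
  have h0 : PySem.Str.findFrom url "/" (-1 + 1) =
      match occSlash url.toList 0 with
      | some i => ((i : Nat) : Int) | none => -1 := by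
    rw [show (-1 + 1 : Int) = 0 from by ring, PySem.Str.findFrom_eq,
      PySem.Chars.findFrom_zero, show ("/" : String).toList = ['/'] from rfl, find_slash]
  rw [cut_occ, show (2 : Nat) = 0 + 1 + 1 from rfl]
  cases hocc0 : occSlash url.toList 0 with
  | none =>
    have h0' : PySem.Str.findFrom url "/" (-1 + 1) = -1 := by rw [h0, hocc0]
    simp only [PySem.Str.findFrom_eq, show ("/" : String).toList = ['/'] from rfl,
      show (-1 + 1 : Int) = 0 from by ring, PySem.Chars.findFrom_zero] at h0'
    have h1 := occ_none_succ hocc0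
    have h2 := occ_none_succ h1
    simp [h0', h1, h2]
  | some i0 =>
    have h0' : PySem.Str.findFrom url "/" (-1 + 1) = ((i0 : Nat) : Int) := by rw [h0, hocc0]
    simp only [PySem.Str.findFrom_eq, show ("/" : String).toList = ['/'] from rfl,
      show (-1 + 1 : Int) = 0 from by ring, PySem.Chars.findFrom_zero] at h0'
    have h1 := findFrom_occ url hocc0
    cases hocc1 : occSlash url.toList (0 + 1) with
    | none =>
      have h1' : PySem.Str.findFrom url "/" (((i0 : Nat) : Int) + 1) = -1 := by rw [h1, hocc1]
      simp only [PySem.Str.findFrom_eq, show ("/" : String).toList = ['/'] from rfl] at h1'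
      have h2 := occ_none_succ hocc1
      simp [h0', h1', h2]
    | some i1 =>
      have h1' : PySem.Str.findFrom url "/" (((i0 : Nat) : Int) + 1) = ((i1 : Nat) : Int) := by
        rw [h1, hocc1]
      simp only [PySem.Str.findFrom_eq, show ("/" : String).toList = ['/'] from rfl] at h1'
      have h2 := findFrom_occ url hocc1
      cases hocc2 : occSlash url.toList (0 + 1 + 1) with
      | none =>
        have h2' : PySem.Str.findFrom url "/" (((i1 : Nat) : Int) + 1) = -1 := by rw [h2, hocc2]
        simp only [PySem.Str.findFrom_eq, show ("/" : String).toList = ['/'] from rfl] at h2'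
        simp [h0', h1', h2']
      | some i2 =>
        have h2' : PySem.Str.findFrom url "/" (((i1 : Nat) : Int) + 1) = ((i2 : Nat) : Int) := by
          rw [h2, hocc2]
        simp only [PySem.Str.findFrom_eq, show ("/" : String).toList = ['/'] from rfl] at h2'
        simp only [hocc2, Option.map_some]
        simp only [PySem.Str.findFrom_eq, show ("/" : String).toList = ['/'] from rfl,
          show (-1 + 1 : Int) = 0 from by ring, PySem.Chars.findFrom_zero,
          Bool.false_eq_true, if_false]
        simp only [h0', show ((((i0 : Nat) : Int)) == -1) = false from by simp,
          Bool.false_eq_true, if_false]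
        simp only [h1', show ((((i1 : Nat) : Int)) == -1) = false from by simp,
          Bool.false_eq_true, if_false]
        simp only [h2']
        rw [if_pos (by omega : ((i2 : Nat) : Int) ≠ -1)]
        apply String.toList_inj.mp
        rw [PySem.Str.toList_slice, String.toList_ofList]
        simp only [PySem.Chars.slice_eq_listSlice]
        rw [PySem.List.slice_to _ (by omega : (0:Int) ≤ ((i2 : Nat) : Int) + 1)]
        congr 1

-- ===== VERDICT (by name: the statement is the Claim_ definition above) =====
theorem remove_extra_url_spec : Claim_equal_remove_extra_url := by
  intro url _
  unfold Spec_remove_extra_url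
  rw [a_cut, alt_cut]
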